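-- pv_equiv track=rewrite | github.com/trustgraph-ai/trustgraph | trustgraph-flow/trustgraph/query/objects/cassandra/service.py | parse_filter_key
-- ===== SOURCE A (Python) =====
-- def parse_filter_key(filter_key: str) -> tuple[str, str]:
--     """Parse GraphQL filter key into field name and operator"""
--     if not filter_key:
--         return ("", "eq")
--
--     # Support common GraphQL filter patterns:
--     # field_name -> (field_name, "eq")
--     # field_name_gt -> (field_name, "gt")
--     # field_name_gte -> (field_name, "gte")
--     # field_name_lt -> (field_name, "lt")
--     # field_name_lte -> (field_name, "lte")
--     # field_name_in -> (field_name, "in")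
--
--     operators = ["_gte", "_lte", "_gt", "_lt", "_in", "_eq"]
--
--     for op_suffix in operators:
--         if filter_key.endswith(op_suffix):
--             field_name = filter_key[:-len(op_suffix)]
--             operator = op_suffix[1:]  # Remove the leading underscore
--             return (field_name, operator)
--
--     # Default to equality if no operator suffix found
--     return (filter_key, "eq")
-- ===== SOURCE B (Python) =====
-- def parse_filter_key(filter_key: str) -> tuple[str, str]:
--     """Parse GraphQL filter key into field name and operator."""
--     head, sep, tail = filter_key.rpartition("_")
--     if sep and tail in {"gt", "gte", "lt", "lte", "in", "eq"}:
--         return (head, tail)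
--     return (filter_key, "eq")
-- ===== Notes on version B (the rewrite author's own statement) =====
-- stated objective: simpler
-- what changed: Replaces the loop over six candidate suffixes (each doing an endswith scan and slicing) with a single rpartition at the last underscore followed by one set-membership test of the tail.
import Mathlib
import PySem

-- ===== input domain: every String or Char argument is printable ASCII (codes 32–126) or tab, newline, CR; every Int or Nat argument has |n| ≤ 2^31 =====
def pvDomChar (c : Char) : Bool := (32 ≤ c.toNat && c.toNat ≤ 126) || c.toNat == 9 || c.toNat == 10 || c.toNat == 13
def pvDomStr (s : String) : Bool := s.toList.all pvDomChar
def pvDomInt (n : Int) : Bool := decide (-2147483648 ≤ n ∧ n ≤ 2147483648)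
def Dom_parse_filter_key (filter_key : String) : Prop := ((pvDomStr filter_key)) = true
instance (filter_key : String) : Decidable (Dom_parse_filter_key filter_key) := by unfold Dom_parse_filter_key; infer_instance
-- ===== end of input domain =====

-- B replaces A's loop over six "_op" suffixes with one split at the last underscore
-- plus a single membership test (objective: simpler).

-- ===== PORT A =====
-- the loop 'for op_suffix in operators: …' with early return
def pfkLoopA (filter_key : String) : List String → String × String
  | [] => (filter_key, "eq")
  | op :: rest =>
    if PySem.Str.endswith filter_key op then
      (PySem.Str.slice filter_key none (some (-(PySem.Str.len op : Int))),
       PySem.Str.slice op (some 1) none)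
    else pfkLoopA filter_key rest

def parse_filter_key (filter_key : String) : String × String :=
  if filter_key = "" then ("", "eq")
  else pfkLoopA filter_key ["_gte", "_lte", "_gt", "_lt", "_in", "_eq"]

-- ===== PORT B =====
-- rpartition(filter_key, '_'): none = no underscore (empty sep);
-- some (head, tail) = parts before/after the LAST underscore
def pfkRPartU : List Char → Option (List Char × List Char)
  | [] => none
  | c :: rest =>
    match pfkRPartU rest with
    | some (h, t) => some (c :: h, t)
    | none => if c = '_' then some ([], rest) else none

def parse_filter_key_alt (filter_key : String) : String × String :=
  match pfkRPartU filter_key.toList with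
  | some (h, t) =>
    if t ∈ [String.toList "gt", String.toList "gte", String.toList "lt",
            String.toList "lte", String.toList "in", String.toList "eq"] then
      (String.ofList h, String.ofList t)
    else (filter_key, "eq")
  | none => (filter_key, "eq")

-- ===== PRECONDITION & SPEC =====
def Spec_parse_filter_key (filter_key : String) (out : String × String) : Prop := out = parse_filter_key_alt filter_key
instance (filter_key : String) (out : String × String) : Decidable (Spec_parse_filter_key filter_key out) := by unfold Spec_parse_filter_key; infer_instance

-- ===== CLAIM (what is proved, stated in full; the proofs are below) =====
def Claim_equal_parse_filter_key : Prop := ∀ (filter_key : String), Dom_parse_filter_key filter_key → Spec_parse_filter_key filter_key (parse_filter_key filter_key)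

-- ===== LEMMAS AND PROOFS =====

-- specification of the rpartition helper
lemma pfkRPartU_none {cs : List Char} (h : pfkRPartU cs = none) : '_' ∉ cs := by
  induction cs with
  | nil => simp
  | cons c rest ih =>
    simp only [pfkRPartU] at h
    cases hr : pfkRPartU rest with
    | some p => rw [hr] at h; cases p; simp at h
    | none =>
      rw [hr] at h
      by_cases hc : c = '_'
      · simp [hc] at h
      · intro hm
        rcases List.mem_cons.mp hm with he | he
        · exact hc he.symm
        · exact ih hr he

lemma pfkRPartU_some {cs h t : List Char} (hs : pfkRPartU cs = some (h, t)) :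
    cs = h ++ '_' :: t ∧ '_' ∉ t := by
  induction cs generalizing h t with
  | nil => simp [pfkRPartU] at hs
  | cons c rest ih =>
    simp only [pfkRPartU] at hs
    cases hr : pfkRPartU rest with
    | some p =>
      obtain ⟨h', t'⟩ := p
      rw [hr] at hs
      simp at hs
      obtain ⟨hh, ht⟩ := hs
      obtain ⟨hrest, hnot⟩ := ih hr
      subst ht
      exact ⟨by rw [← hh, hrest]; simp, hnot⟩
    | none =>
      rw [hr] at hs
      by_cases hc : c = '_'
      · simp [hc] at hs
        obtain ⟨hh, ht⟩ := hs
        subst hh ht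
        exact ⟨by simp [hc], pfkRPartU_none hr⟩
      · simp [hc] at hs

-- a suffix "_w" (with '_' ∉ w) of a list whose part after the last underscore is t must have w = t
lemma suffix_u_unique {cs t w : List Char} (h : List Char)
    (hcs : cs = h ++ '_' :: t) (ht : '_' ∉ t) (hw : '_' ∉ w)
    (hsuf : ('_' :: w) <:+ cs) : w = t := by
  have hsuf2 : ('_' :: t) <:+ cs := hcs ▸ List.suffix_append_of_suffix (List.suffix_refl _)
  have hp1 : ('_' :: w).reverse <+: cs.reverse := List.reverse_prefix.mpr (by simpa using hsuf)
  have hp2 : ('_' :: t).reverse <+: cs.reverse := List.reverse_prefix.mpr (by simpa using hsuf2)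
  have htot := List.prefix_or_prefix_of_prefix hp1 hp2
  have key : ∀ (a b : List Char), '_' ∉ a → '_' ∉ b →
      (a.reverse ++ ['_']) <+: (b.reverse ++ ['_']) → a = b := by
    intro a b ha hb hpre
    rcases Nat.lt_or_ge a.length b.length with hlt | hge
    · exfalso
      have hlen : (a.reverse ++ ['_']).length ≤ b.reverse.length := by
        simp; omega
      have hpre2 : (a.reverse ++ ['_']) <+: b.reverse := by
        have heq := List.prefix_iff_eq_take.mp hpre
        rw [List.take_append_of_le_length hlen] at heq
        rw [heq]
        exact List.take_prefix _ _
      have : '_' ∈ b.reverse := hpre2.subset (by simp)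
      exact hb (by simpa using this)
    · have hlen2 : (b.reverse ++ ['_']).length ≤ (a.reverse ++ ['_']).length := by
        simp; omega
      have heq := List.IsPrefix.eq_of_length_le hpre hlen2
      have : a.reverse = b.reverse := List.append_inj_left' heq (by simp)
      simpa using List.reverse_injective this
  rcases htot with hc1 | hc1
  · exact key w t hw ht (by simpa using hc1)
  · exact (key t w ht hw (by simpa using hc1)).symm

-- endswith characterisation given the rpartition of the string
lemma ends_iff (cs h t w : List Char)
    (hs : cs = h ++ '_' :: t) (ht : '_' ∉ t) (hw : '_' ∉ w) :
    (PySem.Chars.endswith cs ('_' :: w) = true) ↔ w = t := by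
  rw [PySem.Chars.endswith_iff]
  constructor
  · intro hsuf
    exact suffix_u_unique h hs ht hw hsuf
  · intro hwt
    subst hwt
    rw [hs]
    exact List.suffix_append_of_suffix (List.suffix_refl _)

-- no suffix "_w" when the string has no underscore at all
lemma ends_false_of_no_u (cs w : List Char)
    (hnu : '_' ∉ cs) : PySem.Chars.endswith cs ('_' :: w) = false := by
  rw [Bool.eq_false_iff]
  intro hc
  have := (PySem.Chars.endswith_iff _ _).mp hc
  exact hnu (this.subset (by simp))

-- A's field slice: s[:-(|t|+1)] is the head when s = h ++ '_' :: t
lemma slice_head (s : String) (h t : List Char) (hs : s.toList = h ++ '_' :: t) :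
    PySem.Str.slice s none (some (-((t.length + 1 : Nat) : Int))) = String.ofList h := by
  have hth : (PySem.Str.slice s none (some (-((t.length + 1 : Nat) : Int)))).toList = h := by
    rw [PySem.Str.toList_slice, PySem.Chars.slice_eq_listSlice, hs,
        PySem.List.slice_to_neg_natCast _ _ (by omega)]
    have hl : (h ++ '_' :: t).length - (t.length + 1) = h.length := by simp
    rw [hl]
    simpa using List.take_left h ('_' :: t)
  have := congrArg String.ofList hth
  simpa using this

-- ===== VERDICT (by name: the statement is the Claim_ definition above) =====
theorem parse_filter_key_spec : Claim_equal_parse_filter_key := by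
  intro s _
  unfold Spec_parse_filter_key parse_filter_key parse_filter_key_alt
  cases hr : pfkRPartU s.toList with
  | none =>
    have hnu := pfkRPartU_none hr
    by_cases hemp : s = ""
    · simp [hemp, pfkLoopA]
    · have e1 := ends_false_of_no_u s.toList ['g','t','e'] hnu
      have e2 := ends_false_of_no_u s.toList ['l','t','e'] hnu
      have e3 := ends_false_of_no_u s.toList ['g','t'] hnu
      have e4 := ends_false_of_no_u s.toList ['l','t'] hnu
      have e5 := ends_false_of_no_u s.toList ['i','n'] hnu
      have e6 := ends_false_of_no_u s.toList ['e','q'] hnu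
      simp [pfkLoopA, hemp, e1, e2, e3, e4, e5, e6]
  | some p =>
    obtain ⟨h, t⟩ := p
    obtain ⟨hs, ht⟩ := pfkRPartU_some hr
    have hemp : ¬ (s = "") := by
      intro hc
      rw [hc] at hs
      simp at hs
    have e1 := ends_iff s.toList h t ['g','t','e'] hs ht (by decide)
    have e2 := ends_iff s.toList h t ['l','t','e'] hs ht (by decide)
    have e3 := ends_iff s.toList h t ['g','t'] hs ht (by decide)
    have e4 := ends_iff s.toList h t ['l','t'] hs ht (by decide)
    have e5 := ends_iff s.toList h t ['i','n'] hs ht (by decide)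
    have e6 := ends_iff s.toList h t ['e','q'] hs ht (by decide)
    have hsl := slice_head s h t hs
    by_cases hm : t ∈ [String.toList "gt", String.toList "gte", String.toList "lt",
        String.toList "lte", String.toList "in", String.toList "eq"]
    · simp only [List.mem_cons, List.not_mem_nil, or_false] at hm
      have sl1 : PySem.Str.slice "_gte" (some 1) none = String.ofList ['g','t','e'] := by decide
      have sl2 : PySem.Str.slice "_lte" (some 1) none = String.ofList ['l','t','e'] := by decide
      have sl3 : PySem.Str.slice "_gt" (some 1) none = String.ofList ['g','t'] := by decide
      have sl4 : PySem.Str.slice "_lt" (some 1) none = String.ofList ['l','t'] := by decide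
      have sl5 : PySem.Str.slice "_in" (some 1) none = String.ofList ['i','n'] := by decide
      have sl6 : PySem.Str.slice "_eq" (some 1) none = String.ofList ['e','q'] := by decide
      rcases hm with hm | hm | hm | hm | hm | hm <;> subst hm <;>
        simp at hsl <;>
        simp [pfkLoopA, hemp, e1, e2, e3, e4, e5, e6, hsl, sl1, sl2, sl3, sl4, sl5, sl6]
    · have c1 : PySem.Chars.endswith s.toList ['_','g','t','e'] = false := by
        rw [Bool.eq_false_iff]; intro hc; exact hm (by rw [← e1.mp hc]; simp)
      have c2 : PySem.Chars.endswith s.toList ['_','l','t','e'] = false := by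
        rw [Bool.eq_false_iff]; intro hc; exact hm (by rw [← e2.mp hc]; simp)
      have c3 : PySem.Chars.endswith s.toList ['_','g','t'] = false := by
        rw [Bool.eq_false_iff]; intro hc; exact hm (by rw [← e3.mp hc]; simp)
      have c4 : PySem.Chars.endswith s.toList ['_','l','t'] = false := by
        rw [Bool.eq_false_iff]; intro hc; exact hm (by rw [← e4.mp hc]; simp)
      have c5 : PySem.Chars.endswith s.toList ['_','i','n'] = false := by
        rw [Bool.eq_false_iff]; intro hc; exact hm (by rw [← e5.mp hc]; simp)
      have c6 : PySem.Chars.endswith s.toList ['_','e','q'] = false := by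
        rw [Bool.eq_false_iff]; intro hc; exact hm (by rw [← e6.mp hc]; simp)
      simp [pfkLoopA, hemp, c1, c2, c3, c4, c5, c6]
      intro hc
      exact absurd (by rcases hc with h' | h' | h' | h' | h' | h' <;> subst h' <;> decide) hm
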